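-- pv_equiv track=rewrite | github.com/spiderhash-io/webhook | src/openapi_generator.py | _validate_webhook_id
-- ===== SOURCE A (Python) =====
-- from typing import Dict, List, Any, Optional
--
-- def _validate_webhook_id(webhook_id: Any) -> Optional[str]:
--     """
--     Validate and sanitize webhook_id to prevent injection attacks and DoS.
--
--     Args:
--         webhook_id: The webhook identifier to validate
--
--     Returns:
--         Validated webhook_id string or None if invalid
--
--     Raises:
--         ValueError: If webhook_id is invalid or contains dangerous characters
--     """
--     if not webhook_id or not isinstance(webhook_id, str):
--         return None
--
--     webhook_id = webhook_id.strip()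
--
--     if not webhook_id:
--         return None
--
--     # Maximum length to prevent DoS (256 chars is reasonable for identifiers)
--     MAX_WEBHOOK_ID_LENGTH = 256
--     if len(webhook_id) > MAX_WEBHOOK_ID_LENGTH:
--         return None
--
--     # Reject null bytes and control characters (including tab, formfeed, etc.)
--     # Control characters are 0x00-0x1F and 0x7F
--     if '\x00' in webhook_id:
--         return None
--
--     # Check for control characters (excluding space 0x20)
--     for char in webhook_id:
--         if ord(char) < 32 or ord(char) == 127:
--             return None
--
--     # Reject dangerous characters that could be used in path injection
--     dangerous_chars = [';', '|', '&', '$', '`', '\\', '/', '(', ')', '<', '>', '?', '*', '!', '{', '}', '[', ']']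
--     for char in dangerous_chars:
--         if char in webhook_id:
--             return None
--
--     # Reject path traversal patterns
--     if '..' in webhook_id or webhook_id.startswith('/') or webhook_id.startswith('\\'):
--         return None
--
--     return webhook_id
-- ===== SOURCE B (Python) =====
-- # Whitelist single-pass validator: one scan with a previous-character accumulator
-- # replaces A's staged blacklist scans; '..', leading '/' and leading '\' are all
-- # caught by the same pass ('/' and '\' are simply not in the whitelist).
-- _ALLOWED = frozenset(chr(i) for i in range(32, 127)) - set(';|&$`\\/()<>?*!{}[]')
--
-- def _validate_webhook_id(webhook_id):
--     if not isinstance(webhook_id, str):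
--         return None
--     s = webhook_id.strip()
--     if not (0 < len(s) <= 256):
--         return None
--     prev = ''
--     for c in s:
--         if c not in _ALLOWED or (c == '.' and prev == '.'):
--             return None
--         prev = c
--     return s
-- ===== Notes on version B (the rewrite author's own statement) =====
-- stated objective: simpler
-- what changed: B replaces A's staged blacklist scans (separate NUL check, control-character loop, 18 per-character substring scans, a dot-dot substring search and two prefix tests) with a single left-to-right whitelist pass tracking the previous character: any character outside the printable-ASCII-minus-forbidden whitelist rejects, an adjacent dot pair rejects, and the leading-slash and leading-backslash prefix tests are subsumed because both characters are outside the whitelist.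
import Mathlib
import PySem

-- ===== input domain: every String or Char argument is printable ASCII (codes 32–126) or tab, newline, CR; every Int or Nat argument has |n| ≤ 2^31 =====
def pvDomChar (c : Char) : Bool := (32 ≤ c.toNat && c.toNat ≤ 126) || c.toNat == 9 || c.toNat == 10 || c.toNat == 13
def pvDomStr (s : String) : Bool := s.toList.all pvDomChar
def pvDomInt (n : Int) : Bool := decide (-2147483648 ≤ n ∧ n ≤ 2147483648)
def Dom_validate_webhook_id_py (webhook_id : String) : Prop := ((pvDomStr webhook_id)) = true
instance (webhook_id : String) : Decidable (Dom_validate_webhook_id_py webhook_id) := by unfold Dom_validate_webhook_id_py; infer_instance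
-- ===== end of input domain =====

-- B replaces A's staged blacklist scans (NUL check, control-char loop, 18 per-character
-- substring scans, dot-dot search, two prefix tests) by ONE left-to-right whitelist pass
-- tracking the previous character (objective: simpler; equality is claimed on the
-- printable-ASCII domain Dom below).


-- ===== PORT A =====
def pvDangerousChars : List Char :=
  [';', '|', '&', '$', '`', '\\', '/', '(', ')', '<', '>', '?', '*', '!', '{', '}', '[', ']']

-- `'c' in s` for a ONE-character needle is ported as character membership (exact).
def validate_webhook_id_py (webhook_id : String) : Option String :=
  if webhook_id = "" then none
  else if PySem.Str.strip webhook_id = "" then none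
  else if 256 < PySem.Str.len (PySem.Str.strip webhook_id) then none
  -- if '\x00' in webhook_id: return None
  else if (PySem.Str.strip webhook_id).toList.contains '\x00' then none
  -- for char in webhook_id: if ord(char) < 32 or ord(char) == 127: return None
  else if (PySem.Str.strip webhook_id).toList.any (fun c => decide (c.toNat < 32) || c.toNat == 127) then none
  -- for char in dangerous_chars: if char in webhook_id: return None
  else if pvDangerousChars.any (fun d => (PySem.Str.strip webhook_id).toList.contains d) then none
  else if PySem.Str.isIn ".." (PySem.Str.strip webhook_id) || PySem.Str.startswith (PySem.Str.strip webhook_id) "/" || PySem.Str.startswith (PySem.Str.strip webhook_id) "\\" then none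
  else some (PySem.Str.strip webhook_id)

-- ===== PORT B =====
def pvForbidden : List Char :=
  [';', '|', '&', '$', '`', '\\', '/', '(', ')', '<', '>', '?', '*', '!', '{', '}', '[', ']']

-- c ∈ _ALLOWED  (printable ASCII minus the forbidden set)
def pvAllowed (c : Char) : Bool := (32 ≤ c.toNat && c.toNat ≤ 126) && !pvForbidden.contains c

-- the for-loop of B: previous character as accumulator ('' at start ↦ none)
def pvScan : List Char → Option Char → Bool
  | [], _ => false
  | c :: t, prev => if !pvAllowed c || (c == '.' && prev == some '.') then true else pvScan t (some c)

def validate_webhook_id_py_alt (webhook_id : String) : Option String :=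
  if !(decide (0 < PySem.Str.len (PySem.Str.strip webhook_id)) && decide (PySem.Str.len (PySem.Str.strip webhook_id) ≤ 256)) then none
  else if pvScan (PySem.Str.strip webhook_id).toList none then none
  else some (PySem.Str.strip webhook_id)

-- ===== PRECONDITION & SPEC =====
def Spec_validate_webhook_id_py (webhook_id : String) (out : Option String) : Prop := out = validate_webhook_id_py_alt webhook_id
instance (webhook_id : String) (out : Option String) : Decidable (Spec_validate_webhook_id_py webhook_id out) := by unfold Spec_validate_webhook_id_py; infer_instance

-- ===== CLAIM (what is proved, stated in full; the proofs are below) =====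
def Claim_equal_validate_webhook_id_py : Prop := ∀ (webhook_id : String), Dom_validate_webhook_id_py webhook_id → Spec_validate_webhook_id_py webhook_id (validate_webhook_id_py webhook_id)

-- ===== LEMMAS AND PROOFS =====

-- adjacent-dots detector used to characterise pvScan
def pvHasDD : List Char → Bool
  | [] => false
  | c :: t => (c == '.' && t.head? == some '.') || pvHasDD t

theorem scan_eq (l : List Char) (prev : Option Char) :
    pvScan l prev
      = (l.any (fun c => !pvAllowed c) || pvHasDD l || (prev == some '.' && l.head? == some '.')) := by
  induction l generalizing prev with
  | nil => simp [pvScan, pvHasDD]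
  | cons c t ih =>
    have hstep : pvScan (c :: t) prev
        = ((!pvAllowed c || (c == '.' && prev == some '.')) || pvScan t (some c)) := by
      cases hcond : (!pvAllowed c || (c == '.' && prev == some '.')) <;> simp [pvScan, hcond]
    rw [hstep, ih, pvHasDD]
    rw [Bool.eq_iff_iff]
    simp only [Bool.or_eq_true, Bool.and_eq_true, List.any_cons, List.head?_cons]
    tauto

theorem hasDD_iff (l : List Char) : pvHasDD l = true ↔ ['.', '.'] <:+: l := by
  induction l with
  | nil => simp [pvHasDD]
  | cons c t ih =>
    rw [pvHasDD]
    have hpre : (['.', '.'] <+: c :: t) ↔ (c = '.' ∧ t.head? = some '.') := by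
      rw [List.cons_prefix_cons]
      cases t with
      | nil => simp
      | cons d u => simp [List.cons_prefix_cons, eq_comm]
    rw [List.infix_cons_iff]
    simp only [Bool.or_eq_true, Bool.and_eq_true, beq_iff_eq, ih, hpre]

-- every character of the stripped string is a character of the original
theorem mem_strip (wi : String) (c : Char) (h : c ∈ (PySem.Str.strip wi).toList) :
    c ∈ wi.toList := by
  rw [PySem.Str.toList_strip] at h
  unfold PySem.Chars.strip PySem.Chars.rstrip PySem.Chars.lstrip at h
  rw [List.mem_reverse] at h
  have h2 := (List.dropWhile_sublist (l := (wi.toList.dropWhile PySem.Chars.isspace).reverse)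
      (p := PySem.Chars.isspace)).subset h
  rw [List.mem_reverse] at h2
  exact (List.dropWhile_sublist (l := wi.toList) (p := PySem.Chars.isspace)).subset h2

-- A's rejecting scans, as one disjunction, equal B's single pass (on the ASCII domain)
theorem reject_eq (l : List Char) (hd : ∀ c ∈ l, pvDomChar c = true) :
    (l.contains '\x00'
      || l.any (fun c => decide (c.toNat < 32) || c.toNat == 127)
      || pvDangerousChars.any (fun d => l.contains d)
      || (PySem.Chars.isIn ['.', '.'] l
            || PySem.Chars.startswith l ['/'] || PySem.Chars.startswith l ['\\']))
    = pvScan l none := by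
  rw [scan_eq]
  have hnone : ((none : Option Char) == some '.') = false := rfl
  rw [hnone, Bool.false_and, Bool.or_false, Bool.eq_iff_iff]
  simp only [Bool.or_eq_true, List.any_eq_true, List.contains_eq_mem, decide_eq_true_eq,
    PySem.Chars.isIn_iff_infix, PySem.Chars.startswith_iff, ← hasDD_iff,
    Bool.not_eq_true', beq_iff_eq]
  have hle : ∀ c ∈ l, c.toNat ≤ 126 := by
    intro c hc
    have hdc := hd c hc
    simp only [pvDomChar, Bool.or_eq_true, Bool.and_eq_true, decide_eq_true_eq,
      beq_iff_eq] at hdc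
    omega
  have hallow : ∀ c ∈ l, (pvAllowed c = false ↔ (c.toNat < 32 ∨ c ∈ pvForbidden)) := by
    intro c hc
    have h126 := hle c hc
    simp only [pvAllowed, Bool.and_eq_false_iff, Bool.not_eq_false', List.contains_eq_mem,
      decide_eq_false_iff_not, decide_eq_true_eq, not_le]
    constructor
    · rintro ((h | h) | h)
      · exact Or.inl h
      · omega
      · exact Or.inr h
    · rintro (h | h)
      · exact Or.inl (Or.inl h)
      · exact Or.inr h
  constructor
  · rintro (((h0 | ⟨c, hc, hlt | h127⟩) | ⟨d, hdang, hdl⟩) | (hdd | hsl) | hbs)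
    · exact Or.inl ⟨'\x00', h0, (hallow _ h0).mpr (Or.inl (by decide))⟩
    · exact Or.inl ⟨c, hc, (hallow _ hc).mpr (Or.inl hlt)⟩
    · have := hle c hc
      omega
    · exact Or.inl ⟨d, hdl, (hallow _ hdl).mpr (Or.inr hdang)⟩
    · exact Or.inr hdd
    · have hm : '/' ∈ l := hsl.subset (by simp)
      exact Or.inl ⟨'/', hm, (hallow _ hm).mpr (Or.inr (by decide))⟩
    · have hm : '\\' ∈ l := hbs.subset (by simp)
      exact Or.inl ⟨'\\', hm, (hallow _ hm).mpr (Or.inr (by decide))⟩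
  · rintro (⟨c, hc, hna⟩ | hdd)
    · rcases (hallow _ hc).mp hna with h | h
      · exact Or.inl (Or.inl (Or.inr ⟨c, hc, Or.inl h⟩))
      · exact Or.inl (Or.inr ⟨c, h, hc⟩)
    · exact Or.inr (Or.inl (Or.inl hdd))

-- reject_eq restated on String, as the ports write it
theorem reject_eq' (s : String) (hd : ∀ c ∈ s.toList, pvDomChar c = true) :
    (s.toList.contains '\x00'
      || s.toList.any (fun c => decide (c.toNat < 32) || c.toNat == 127)
      || pvDangerousChars.any (fun d => s.toList.contains d)
      || (PySem.Str.isIn ".." s || PySem.Str.startswith s "/" || PySem.Str.startswith s "\\"))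
    = pvScan s.toList none := by
  have e1 : PySem.Str.isIn ".." s = PySem.Chars.isIn ['.', '.'] s.toList := by
    rw [PySem.Str.isIn_eq, show (".." : String).toList = ['.', '.'] from by decide]
  have e2 : PySem.Str.startswith s "/" = PySem.Chars.startswith s.toList ['/'] := by
    rw [PySem.Str.startswith_eq, show ("/" : String).toList = ['/'] from by decide]
  have e3 : PySem.Str.startswith s "\\" = PySem.Chars.startswith s.toList ['\\'] := by
    rw [PySem.Str.startswith_eq, show ("\\" : String).toList = ['\\'] from by decide]
  rw [e1, e2, e3]
  exact reject_eq s.toList hd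

-- four consecutive rejecting ifs collapse to their disjunction
theorem chain4 {α : Type} (b1 b2 b3 b4 : Bool) (x : Option α) :
    (if b1 then (none : Option α) else if b2 then none else if b3 then none else if b4 then none else x)
    = if (b1 || b2 || b3 || b4) then none else x := by
  cases b1 <;> cases b2 <;> cases b3 <;> cases b4 <;> simp

-- ===== VERDICT (by name: the statement is the Claim_ definition above) =====
theorem validate_webhook_id_py_spec : Claim_equal_validate_webhook_id_py := by
  intro wi hdom
  unfold Spec_validate_webhook_id_py validate_webhook_id_py validate_webhook_id_py_alt
  by_cases h1 : wi = ""
  · subst h1; decide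
  simp only [if_neg h1]
  by_cases h2 : PySem.Str.strip wi = ""
  · rw [if_pos h2, h2]
    decide
  have hlen0 : 0 < PySem.Str.len (PySem.Str.strip wi) := by
    unfold PySem.Str.len
    have : (PySem.Str.strip wi).toList ≠ [] := by
      intro hnil
      apply h2
      rw [PySem.Str.toList_strip] at hnil
      unfold PySem.Str.strip
      rw [hnil]
    have := List.length_pos_iff.mpr this
    exact_mod_cast this
  by_cases h3 : 256 < PySem.Str.len (PySem.Str.strip wi)
  · rw [if_neg h2, if_pos h3, if_pos]
    simp only [Bool.not_eq_true', Bool.and_eq_false_iff, decide_eq_false_iff_not, not_le]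
    right; omega
  · have hB : (!(decide (0 < PySem.Str.len (PySem.Str.strip wi)) && decide (PySem.Str.len (PySem.Str.strip wi) ≤ 256))) = false := by
      simp only [Bool.not_eq_false', Bool.and_eq_true, decide_eq_true_eq]
      omega
    have hd : ∀ c ∈ (PySem.Str.strip wi).toList, pvDomChar c = true := by
      intro c hc
      have := hdom
      unfold Dom_validate_webhook_id_py pvDomStr at this
      rw [List.all_eq_true] at this
      exact this c (mem_strip wi c hc)
    rw [if_neg h2, if_neg h3, hB]
    simp only [Bool.false_eq_true, if_false]
    rw [chain4, reject_eq' (PySem.Str.strip wi) hd]
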